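-- pv_equiv track=rewrite | github.com/alexandraback/datacollection | solutions_5648941810974720_1/Python/EscapeSequence/main.py | solve
-- ===== SOURCE A (Python) =====
-- def solve(s):
-- 	m = [[0, 0, 0, 0, 0, 0, 0, 0, 0, 1], [1, 2, -2, -1, -2, 0, 0, 0,   3, -1], [0, 0, -1, 0, 0, 1, 0, 0, 0, 0], [0, -1, 1, 0, 0, 0, 0, 0,   0, 0], [0, 0, 0, 0, 0, 0, 1, 0, 0, 0], [0, 0, 0, 0, -1, 0, 0, 1, 1,   0], [0, 0, 0, 0, 0, 0, 0, 0, 1, 0], [0, 0, 0, 0, 1, 0, 0, 0, -1,   0], [0, 1, 0, 0, 0, 0, 0, 0, 0, 0], [0, -1, 0, 1, 1, 0, 0, -1, -2,   0]]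
-- 	c = [s.count(x) for x in ["E", "G", "H", "I", "S", "T", "U", "V", "X", "Z"]]
-- 	a = [sum([a*b for a,b in zip(r,c)]) for r in m]
-- 	s = ""
-- 	for i in range(10):
-- 		s += str(i) * a[i]
-- 	return s
-- ===== SOURCE B (Python) =====
-- _COL = {
--     'E': [0, 1, 0, 0, 0, 0, 0, 0, 0, 0],
--     'G': [0, 2, 0, -1, 0, 0, 0, 0, 1, -1],
--     'H': [0, -2, -1, 1, 0, 0, 0, 0, 0, 0],
--     'I': [0, -1, 0, 0, 0, 0, 0, 0, 0, 1],
--     'S': [0, -2, 0, 0, 0, -1, 0, 1, 0, 1],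
--     'T': [0, 0, 1, 0, 0, 0, 0, 0, 0, 0],
--     'U': [0, 0, 0, 0, 1, 0, 0, 0, 0, 0],
--     'V': [0, 0, 0, 0, 0, 1, 0, 0, 0, -1],
--     'X': [0, 3, 0, 0, 0, 1, 1, -1, 0, -2],
--     'Z': [1, -1, 0, 0, 0, 0, 0, 0, 0, 0],
-- }
--
-- def solve(s):
--     a = [0] * 10
--     for ch in s:
--         col = _COL.get(ch)
--         if col is not None:
--             a = [x + y for x, y in zip(a, col)]
--     out = ""
--     for i in range(10):
--         out += str(i) * a[i]
--     return out
-- ===== Notes on version B (the rewrite author's own statement) =====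
-- stated objective: alternative
-- what changed: B replaces ten separate s.count scans followed by a 10x10 matrix-vector multiply with a single pass over s that adds the precomputed matrix column of each recognised letter into the accumulator vector; it makes one traversal instead of ten, though CPython's C-level str.count makes A faster in practice.
import Mathlib
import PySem

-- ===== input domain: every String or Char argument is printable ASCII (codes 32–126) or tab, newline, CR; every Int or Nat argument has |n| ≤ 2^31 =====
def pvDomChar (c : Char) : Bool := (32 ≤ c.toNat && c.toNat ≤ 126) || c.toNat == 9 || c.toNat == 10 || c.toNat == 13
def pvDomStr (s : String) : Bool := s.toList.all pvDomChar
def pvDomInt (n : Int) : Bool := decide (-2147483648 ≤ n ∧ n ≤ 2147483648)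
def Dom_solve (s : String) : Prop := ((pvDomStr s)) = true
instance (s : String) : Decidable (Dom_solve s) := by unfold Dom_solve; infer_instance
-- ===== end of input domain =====

-- B replaces A's ten .count scans + matrix-vector multiply by a single pass over s adding precomputed matrix columns (objective: alternative).

-- Python's  t * n  (string repetition with an Int count): empty for n ≤ 0 (Int.toNat clamps to 0) — exact.
def pvStrMul (t : List Char) (n : Int) : List Char := (List.replicate n.toNat t).flatten

-- ===== PORT A =====
def solve (s : String) : String :=
  let m : List (List Int) :=
    [[0, 0, 0, 0, 0, 0, 0, 0, 0, 1], [1, 2, -2, -1, -2, 0, 0, 0, 3, -1],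
     [0, 0, -1, 0, 0, 1, 0, 0, 0, 0], [0, -1, 1, 0, 0, 0, 0, 0, 0, 0],
     [0, 0, 0, 0, 0, 0, 1, 0, 0, 0], [0, 0, 0, 0, -1, 0, 0, 1, 1, 0],
     [0, 0, 0, 0, 0, 0, 0, 0, 1, 0], [0, 0, 0, 0, 1, 0, 0, 0, -1, 0],
     [0, 1, 0, 0, 0, 0, 0, 0, 0, 0], [0, -1, 0, 1, 1, 0, 0, -1, -2, 0]]
  let c : List Int := (["E", "G", "H", "I", "S", "T", "U", "V", "X", "Z"]).map
      (fun x => (PySem.Str.count s x : Int))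
  let a : List Int := m.map (fun r => ((r.zip c).map (fun p => p.1 * p.2)).sum)
  let out : List Char := (PySem.List.pyRange 0 10 1).foldl
      (fun acc i => acc ++ pvStrMul (PySem.Int.toChars i) (PySem.List.pyGetD a i 0)) []
  String.ofList out

-- ===== PORT B =====
def pvCols : PySem.Dict Char (List Int) := PySem.Dict.mk
  [('E', [0, 1, 0, 0, 0, 0, 0, 0, 0, 0]), ('G', [0, 2, 0, -1, 0, 0, 0, 0, 1, -1]),
   ('H', [0, -2, -1, 1, 0, 0, 0, 0, 0, 0]), ('I', [0, -1, 0, 0, 0, 0, 0, 0, 0, 1]),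
   ('S', [0, -2, 0, 0, 0, -1, 0, 1, 0, 1]), ('T', [0, 0, 1, 0, 0, 0, 0, 0, 0, 0]),
   ('U', [0, 0, 0, 0, 1, 0, 0, 0, 0, 0]), ('V', [0, 0, 0, 0, 0, 1, 0, 0, 0, -1]),
   ('X', [0, 3, 0, 0, 0, 1, 1, -1, 0, -2]), ('Z', [1, -1, 0, 0, 0, 0, 0, 0, 0, 0])]

def solve_alt (s : String) : String :=
  let a : List Int := s.toList.foldl
      (fun acc ch =>
        match pvCols.get? ch with
        | some col => (acc.zip col).map (fun p => p.1 + p.2)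
        | none => acc)
      (List.replicate 10 0)
  let out : List Char := (PySem.List.pyRange 0 10 1).foldl
      (fun acc i => acc ++ pvStrMul (PySem.Int.toChars i) (PySem.List.pyGetD a i 0)) []
  String.ofList out

-- ===== PRECONDITION & SPEC =====
def Spec_solve (s : String) (out : String) : Prop := out = solve_alt s
instance (s : String) (out : String) : Decidable (Spec_solve s out) := by unfold Spec_solve; infer_instance

-- ===== CLAIM (what is proved, stated in full; the proofs are below) =====
def Claim_equal_solve : Prop := ∀ (s : String), Dom_solve s → Spec_solve s (solve s)

-- ===== LEMMAS AND PROOFS =====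

-- B's fold step, named for the proofs (definitionally the lambda inside solve_alt)
def pvStep (acc : List Int) (ch : Char) : List Int :=
  match pvCols.get? ch with
  | some col => (acc.zip col).map (fun p => p.1 + p.2)
  | none => acc

-- the ten letter counts of a character list, as Ints
def pvE (l : List Char) : Int := l.count 'E'
def pvG (l : List Char) : Int := l.count 'G'
def pvH (l : List Char) : Int := l.count 'H'
def pvI (l : List Char) : Int := l.count 'I'
def pvS (l : List Char) : Int := l.count 'S'
def pvT (l : List Char) : Int := l.count 'T'
def pvU (l : List Char) : Int := l.count 'U'
def pvV (l : List Char) : Int := l.count 'V'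
def pvX (l : List Char) : Int := l.count 'X'
def pvZ (l : List Char) : Int := l.count 'Z'

-- B's column-adding fold, characterised component by component in terms of the letter counts
lemma foldB (l : List Char) : ∀ x0 x1 x2 x3 x4 x5 x6 x7 x8 x9 : Int,
    List.foldl pvStep [x0,x1,x2,x3,x4,x5,x6,x7,x8,x9] l =
      [x0 + pvZ l,
       x1 + (pvE l + 2*pvG l - 2*pvH l - pvI l - 2*pvS l + 3*pvX l - pvZ l),
       x2 + (-pvH l + pvT l),
       x3 + (-pvG l + pvH l),
       x4 + pvU l,
       x5 + (-pvS l + pvV l + pvX l),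
       x6 + pvX l,
       x7 + (pvS l - pvX l),
       x8 + pvG l,
       x9 + (-pvG l + pvI l + pvS l - pvV l - 2*pvX l)] := by
  induction l with
  | nil =>
    intro x0 x1 x2 x3 x4 x5 x6 x7 x8 x9
    simp [pvE, pvG, pvH, pvI, pvS, pvT, pvU, pvV, pvX, pvZ]
  | cons ch t ih =>
    intro x0 x1 x2 x3 x4 x5 x6 x7 x8 x9
    rw [List.foldl_cons]
    by_cases hE : ch = 'E'
    · subst hE
      rw [show ∀ xs : List Int, pvStep xs 'E' = (xs.zip [0,1,0,0,0,0,0,0,0,0]).map (fun p => p.1 + p.2) from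
            fun xs => by simp [pvStep, show pvCols.get? 'E' = some [0,1,0,0,0,0,0,0,0,0] from by decide]]
      simp only [List.zip, List.zipWith, List.map, ih]
      simp [pvE, pvG, pvH, pvI, pvS, pvT, pvU, pvV, pvX, pvZ] <;> omega
    by_cases hG : ch = 'G'
    · subst hG
      rw [show ∀ xs : List Int, pvStep xs 'G' = (xs.zip [0,2,0,-1,0,0,0,0,1,-1]).map (fun p => p.1 + p.2) from
            fun xs => by simp [pvStep, show pvCols.get? 'G' = some [0,2,0,-1,0,0,0,0,1,-1] from by decide]]
      simp only [List.zip, List.zipWith, List.map, ih]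
      simp [pvE, pvG, pvH, pvI, pvS, pvT, pvU, pvV, pvX, pvZ] <;> omega
    by_cases hH : ch = 'H'
    · subst hH
      rw [show ∀ xs : List Int, pvStep xs 'H' = (xs.zip [0,-2,-1,1,0,0,0,0,0,0]).map (fun p => p.1 + p.2) from
            fun xs => by simp [pvStep, show pvCols.get? 'H' = some [0,-2,-1,1,0,0,0,0,0,0] from by decide]]
      simp only [List.zip, List.zipWith, List.map, ih]
      simp [pvE, pvG, pvH, pvI, pvS, pvT, pvU, pvV, pvX, pvZ] <;> omega
    by_cases hI : ch = 'I'
    · subst hI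
      rw [show ∀ xs : List Int, pvStep xs 'I' = (xs.zip [0,-1,0,0,0,0,0,0,0,1]).map (fun p => p.1 + p.2) from
            fun xs => by simp [pvStep, show pvCols.get? 'I' = some [0,-1,0,0,0,0,0,0,0,1] from by decide]]
      simp only [List.zip, List.zipWith, List.map, ih]
      simp [pvE, pvG, pvH, pvI, pvS, pvT, pvU, pvV, pvX, pvZ] <;> omega
    by_cases hS : ch = 'S'
    · subst hS
      rw [show ∀ xs : List Int, pvStep xs 'S' = (xs.zip [0,-2,0,0,0,-1,0,1,0,1]).map (fun p => p.1 + p.2) from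
            fun xs => by simp [pvStep, show pvCols.get? 'S' = some [0,-2,0,0,0,-1,0,1,0,1] from by decide]]
      simp only [List.zip, List.zipWith, List.map, ih]
      simp [pvE, pvG, pvH, pvI, pvS, pvT, pvU, pvV, pvX, pvZ] <;> omega
    by_cases hT : ch = 'T'
    · subst hT
      rw [show ∀ xs : List Int, pvStep xs 'T' = (xs.zip [0,0,1,0,0,0,0,0,0,0]).map (fun p => p.1 + p.2) from
            fun xs => by simp [pvStep, show pvCols.get? 'T' = some [0,0,1,0,0,0,0,0,0,0] from by decide]]
      simp only [List.zip, List.zipWith, List.map, ih]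
      simp [pvE, pvG, pvH, pvI, pvS, pvT, pvU, pvV, pvX, pvZ] <;> omega
    by_cases hU : ch = 'U'
    · subst hU
      rw [show ∀ xs : List Int, pvStep xs 'U' = (xs.zip [0,0,0,0,1,0,0,0,0,0]).map (fun p => p.1 + p.2) from
            fun xs => by simp [pvStep, show pvCols.get? 'U' = some [0,0,0,0,1,0,0,0,0,0] from by decide]]
      simp only [List.zip, List.zipWith, List.map, ih]
      simp [pvE, pvG, pvH, pvI, pvS, pvT, pvU, pvV, pvX, pvZ] <;> omega
    by_cases hV : ch = 'V'
    · subst hV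
      rw [show ∀ xs : List Int, pvStep xs 'V' = (xs.zip [0,0,0,0,0,1,0,0,0,-1]).map (fun p => p.1 + p.2) from
            fun xs => by simp [pvStep, show pvCols.get? 'V' = some [0,0,0,0,0,1,0,0,0,-1] from by decide]]
      simp only [List.zip, List.zipWith, List.map, ih]
      simp [pvE, pvG, pvH, pvI, pvS, pvT, pvU, pvV, pvX, pvZ] <;> omega
    by_cases hX : ch = 'X'
    · subst hX
      rw [show ∀ xs : List Int, pvStep xs 'X' = (xs.zip [0,3,0,0,0,1,1,-1,0,-2]).map (fun p => p.1 + p.2) from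
            fun xs => by simp [pvStep, show pvCols.get? 'X' = some [0,3,0,0,0,1,1,-1,0,-2] from by decide]]
      simp only [List.zip, List.zipWith, List.map, ih]
      simp [pvE, pvG, pvH, pvI, pvS, pvT, pvU, pvV, pvX, pvZ] <;> omega
    by_cases hZ : ch = 'Z'
    · subst hZ
      rw [show ∀ xs : List Int, pvStep xs 'Z' = (xs.zip [1,-1,0,0,0,0,0,0,0,0]).map (fun p => p.1 + p.2) from
            fun xs => by simp [pvStep, show pvCols.get? 'Z' = some [1,-1,0,0,0,0,0,0,0,0] from by decide]]
      simp only [List.zip, List.zipWith, List.map, ih]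
      simp [pvE, pvG, pvH, pvI, pvS, pvT, pvU, pvV, pvX, pvZ] <;> omega
    rw [show pvStep [x0,x1,x2,x3,x4,x5,x6,x7,x8,x9] ch = [x0,x1,x2,x3,x4,x5,x6,x7,x8,x9] from by
          simp [pvStep, pvCols,
            Ne.symm hE, Ne.symm hG, Ne.symm hH, Ne.symm hI, Ne.symm hS,
            Ne.symm hT, Ne.symm hU, Ne.symm hV, Ne.symm hX, Ne.symm hZ, PySem.Dict.get?]]
    rw [ih]
    simp [pvE, pvG, pvH, pvI, pvS, pvT, pvU, pvV, pvX, pvZ, List.count_cons, hE, hG, hH, hI, hS, hT, hU, hV, hX, hZ]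

-- a single-character substring count is the character count
lemma count_go_single (c : Char) : ∀ (l : List Char) (fuel acc : Nat), l.length ≤ fuel →
    PySem.Chars.count.go [c] fuel l acc = acc + l.count c := by
  intro l
  induction l with
  | nil => intro fuel acc _; cases fuel <;> simp [PySem.Chars.count.go]
  | cons h t ih =>
    intro fuel acc hf
    cases fuel with
    | zero => simp at hf
    | succ f =>
      by_cases hc : h = c
      · subst hc
        simp [PySem.Chars.count.go, List.isPrefixOf, ih f (acc + 1) (by simpa using hf)]
        omega
      · simp [PySem.Chars.count.go, List.isPrefixOf, hc, Ne.symm hc, ih f acc (by simpa using hf)]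

lemma count_single (l : List Char) (c : Char) :
    PySem.Chars.count l [c] = l.count c := by
  simp [PySem.Chars.count, count_go_single c l l.length 0 (le_refl _)]

-- A's vector a equals B's column-adding fold
lemma vecA (s : String) :
    ([[0, 0, 0, 0, 0, 0, 0, 0, 0, 1], [1, 2, -2, -1, -2, 0, 0, 0, 3, -1],
      [0, 0, -1, 0, 0, 1, 0, 0, 0, 0], [0, -1, 1, 0, 0, 0, 0, 0, 0, 0],
      [0, 0, 0, 0, 0, 0, 1, 0, 0, 0], [0, 0, 0, 0, -1, 0, 0, 1, 1, 0],
      [0, 0, 0, 0, 0, 0, 0, 0, 1, 0], [0, 0, 0, 0, 1, 0, 0, 0, -1, 0],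
      [0, 1, 0, 0, 0, 0, 0, 0, 0, 0], [0, -1, 0, 1, 1, 0, 0, -1, -2, 0]] : List (List Int)).map
      (fun r => ((r.zip ((["E", "G", "H", "I", "S", "T", "U", "V", "X", "Z"]).map
          (fun x => (PySem.Str.count s x : Int)))).map (fun p => p.1 * p.2)).sum)
    = List.foldl pvStep (List.replicate 10 (0:Int)) s.toList := by
  have hB : List.foldl pvStep [(0:Int),0,0,0,0,0,0,0,0,0] s.toList =
      [pvZ s.toList,
       pvE s.toList + 2*pvG s.toList - 2*pvH s.toList - pvI s.toList - 2*pvS s.toList + 3*pvX s.toList - pvZ s.toList,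
       -pvH s.toList + pvT s.toList,
       -pvG s.toList + pvH s.toList,
       pvU s.toList,
       -pvS s.toList + pvV s.toList + pvX s.toList,
       pvX s.toList,
       pvS s.toList - pvX s.toList,
       pvG s.toList,
       -pvG s.toList + pvI s.toList + pvS s.toList - pvV s.toList - 2*pvX s.toList] := by
    rw [foldB]; simp
  refine Eq.trans ?_ hB.symm |>.trans rfl
  simp [PySem.Str.count, count_single, pvE, pvG, pvH, pvI, pvS, pvT, pvU, pvV, pvX, pvZ]
  ring_nf
  simp

-- ===== VERDICT (by name: the statement is the Claim_ definition above) =====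
theorem solve_spec : Claim_equal_solve := by
  intro s _
  exact congrArg
    (fun a => String.ofList ((PySem.List.pyRange 0 10 1).foldl
      (fun acc i => acc ++ pvStrMul (PySem.Int.toChars i) (PySem.List.pyGetD a i 0)) []))
    (vecA s)
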